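-- pv_equiv track=rewrite | github.com/pypi-data/pypi-mirror-371 | packages/cotinga/cotinga-0.2.7-py3-none-any.whl/cotinga/core/report.py | workout_spans
-- ===== SOURCE A (Python) =====
-- def workout_spans(spans):
--     result = []
--     start_span = None
--     for i, span in enumerate(spans):
--         if start_span is None:
--             if span:
--                 start_span = i - 1
--         else:
--             if not span:
--                 result.append(('SPAN', (start_span, 0), (i - 1, 0)))
--                 start_span = None
--     return result
-- ===== SOURCE B (Python) =====
-- def workout_spans(spans):
--     # Pass 1: run-length encode spans by truthiness (i = start of current run,
--     # j scans to the end of the run).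
--     runs = []
--     n = len(spans)
--     i = 0
--     while i < n:
--         j = i + 1
--         while j < n and bool(spans[j]) == bool(spans[i]):
--             j += 1
--         runs.append((bool(spans[i]), j - i))
--         i = j
--     # Pass 2: emit a SPAN for each truthy run closed by a later falsy value.
--     result = []
--     i = 0
--     for b, k in runs:
--         if b and i + k < n:
--             result.append(('SPAN', (i - 1, 0), (i + k - 1, 0)))
--         i += k
--     return result
-- ===== Notes on version B (the rewrite author's own statement) =====
-- stated objective: alternative
-- what changed: Replaces A's one-pass start_span state machine with a two-pass algorithm: first run-length-encode the list by truthiness, then emit a SPAN for each truthy run that is closed before the end of the list.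
import Mathlib
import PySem

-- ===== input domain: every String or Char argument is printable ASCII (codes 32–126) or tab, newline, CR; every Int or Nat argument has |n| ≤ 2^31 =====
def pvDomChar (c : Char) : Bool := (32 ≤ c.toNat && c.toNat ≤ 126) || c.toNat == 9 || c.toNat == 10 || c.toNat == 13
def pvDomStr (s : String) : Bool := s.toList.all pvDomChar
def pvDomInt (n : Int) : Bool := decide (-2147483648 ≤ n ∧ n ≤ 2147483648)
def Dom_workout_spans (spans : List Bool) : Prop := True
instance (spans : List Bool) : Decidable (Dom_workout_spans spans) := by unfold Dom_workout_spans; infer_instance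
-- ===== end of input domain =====

-- B replaces A's incremental single-variable state machine by a two-pass
-- run-length-encode-then-emit algorithm (objective: alternative, same O(n) cost).


-- ===== PORT A =====
-- A's for-loop over enumerate(spans) as structural recursion over the same state
-- (i = current index, start = start_span, acc = result).
def aLoop (l : List Bool) (i : Int) (start : Option Int)
    (acc : List (String × (Int × Int) × (Int × Int))) :
    List (String × (Int × Int) × (Int × Int)) :=
  match l, start with
  | [], _ => acc
  | s :: t, none => aLoop t (i + 1) (if s then some (i - 1) else none) acc
  | s :: t, some st =>
      if s then aLoop t (i + 1) (some st) acc
      else aLoop t (i + 1) none (acc ++ [("SPAN", (st, 0), (i - 1, 0))])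

def workout_spans (spans : List Bool) : List (String × (Int × Int) × (Int × Int)) :=
  aLoop spans 0 none []

-- ===== PORT B =====
-- the inner while loop of Source B: length of the leading run equal to b
def countRun (b : Bool) : List Bool → Nat
  | [] => 0
  | x :: t => if x == b then 1 + countRun b t else 0

theorem countRun_self_cons (x : Bool) (t : List Bool) : 1 ≤ countRun x (x :: t) := by
  simp [countRun]

-- the outer while loop of Source B: run-length encoding of the list
def bRuns : List Bool → List (Bool × Nat)
  | [] => []
  | x :: t =>
      let k := countRun x (x :: t)
      (x, k) :: bRuns ((x :: t).drop k)
  termination_by l => l.length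
  decreasing_by
    have h1 := countRun_self_cons x t
    simp
    omega

-- the emit for-loop of Source B, same state (i, acc)
def emitLoop (runs : List (Bool × Nat)) (i : Int) (total : Nat)
    (acc : List (String × (Int × Int) × (Int × Int))) :
    List (String × (Int × Int) × (Int × Int)) :=
  match runs with
  | [] => acc
  | (b, n) :: rs =>
      emitLoop rs (i + n) total
        (if b && decide (i + (n : Int) < (total : Int)) then
          acc ++ [("SPAN", (i - 1, 0), (i + n - 1, 0))]
        else acc)

def workout_spans_alt (spans : List Bool) : List (String × (Int × Int) × (Int × Int)) :=
  emitLoop (bRuns spans) 0 spans.length []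

-- ===== PRECONDITION & SPEC =====
def Spec_workout_spans (spans : List Bool) (out : List (String × (Int × Int) × (Int × Int))) : Prop := out = workout_spans_alt spans
instance (spans : List Bool) (out : List (String × (Int × Int) × (Int × Int))) : Decidable (Spec_workout_spans spans out) := by unfold Spec_workout_spans; infer_instance

-- ===== CLAIM (what is proved, stated in full; the proofs are below) =====
def Claim_equal_workout_spans : Prop := ∀ (spans : List Bool), Dom_workout_spans spans → Spec_workout_spans spans (workout_spans spans)

-- ===== LEMMAS AND PROOFS =====

theorem countRun_le_length (b : Bool) (l : List Bool) : countRun b l ≤ l.length := by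
  induction l with
  | nil => simp [countRun]
  | cons x t ih => simp only [countRun]; split <;> simp <;> omega

-- the element just past the leading b-run is !b
theorem drop_countRun (b : Bool) (l : List Bool) (h : countRun b l < l.length) :
    l.drop (countRun b l) = (!b) :: l.drop (countRun b l + 1) := by
  induction l with
  | nil => simp at h
  | cons x t ih =>
    by_cases hx : x = b
    · subst hx
      simp only [countRun, beq_self_eq_true, if_true] at h ⊢
      have h' : countRun x t < t.length := by simp at h; omega
      have := ih h'
      simpa [Nat.add_comm 1 (countRun x t)] using this
    · have hb : (x == b) = false := by simp [hx]
      have hx' : x = !b := by cases x <;> cases b <;> simp_all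
      simp [countRun, hb, hx']

-- A's loop in the "inside a run" state, characterised by the length of the
-- remaining run of trues
theorem aLoop_mid (l : List Bool) (p st : Int)
    (acc : List (String × (Int × Int) × (Int × Int))) :
    aLoop l p (some st) acc =
      if countRun true l = l.length then acc
      else aLoop (l.drop (countRun true l + 1)) (p + countRun true l + 1) none
        (acc ++ [("SPAN", (st, 0), (p + countRun true l - 1, 0))]) := by
  induction l generalizing p acc with
  | nil => simp [aLoop, countRun]
  | cons s t ih =>
    cases s with
    | true =>
      have hc : countRun true (true :: t) = 1 + countRun true t := by simp [countRun]
      rw [show aLoop (true :: t) p (some st) acc = aLoop t (p + 1) (some st) acc from rfl,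
        ih]
      by_cases h : countRun true t = t.length
      · rw [if_pos h, if_pos (by simp [hc, h]; omega)]
      · have hne : ¬ countRun true (true :: t) = (true :: t).length := by
          simp [hc]; omega
        rw [if_neg h, if_neg hne]
        have e1 : (true :: t).drop (countRun true (true :: t) + 1)
            = t.drop (countRun true t + 1) := by simp [hc, Nat.add_comm 1 (countRun true t)]
        have e2 : p + (countRun true (true :: t) : Int) + 1
            = p + 1 + (countRun true t : Int) + 1 := by simp [hc]; push_cast; ring
        have e3 : p + (countRun true (true :: t) : Int) - 1
            = p + 1 + (countRun true t : Int) - 1 := by simp [hc]; push_cast; ring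
        rw [e1, e2, e3]
    | false =>
      have hc : countRun true (false :: t) = 0 := by simp [countRun]
      have hne : ¬ countRun true (false :: t) = (false :: t).length := by simp [hc]
      rw [if_neg hne]
      simp only [aLoop, if_neg (by simp : ¬ (false = true))]
      simp [hc]

-- pushing a leading false into the run list does not change what is emitted
theorem emit_false_cons (t : List Bool) (p : Int) (T : Nat)
    (acc : List (String × (Int × Int) × (Int × Int))) :
    emitLoop (bRuns (false :: t)) p T acc = emitLoop (bRuns t) (p + 1) T acc := by
  rw [show bRuns (false :: t)
      = (false, countRun false (false :: t)) :: bRuns ((false :: t).drop (countRun false (false :: t))) from by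
    rw [bRuns]]
  simp only [emitLoop, Bool.false_and, Bool.false_eq_true, if_false]
  have hc : countRun false (false :: t) = 1 + countRun false t := by simp [countRun]
  cases t with
  | nil => simp [hc, countRun, bRuns, emitLoop]
  | cons x t' =>
    cases x with
    | true =>
      have h0 : countRun false (true :: t') = 0 := by simp [countRun]
      simp [hc, h0]
    | false =>
      rw [show bRuns (false :: t')
          = (false, countRun false (false :: t')) :: bRuns ((false :: t').drop (countRun false (false :: t'))) from by
        rw [bRuns]]
      simp only [emitLoop, Bool.false_and, Bool.false_eq_true, if_false]
      have e1 : (false :: false :: t').drop (countRun false (false :: false :: t'))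
          = (false :: t').drop (countRun false (false :: t')) := by
        rw [hc, Nat.add_comm]; rfl
      have e2 : p + (countRun false (false :: false :: t') : Int)
          = p + 1 + (countRun false (false :: t') : Int) := by
        rw [hc]; push_cast; ring
      rw [e1, e2]

-- main invariant: A's loop in the "outside a run" state equals B's emit over
-- the run-length encoding of the remainder
theorem main_none (n : Nat) : ∀ (l : List Bool) (p : Nat) (T : Nat)
    (acc : List (String × (Int × Int) × (Int × Int))), l.length ≤ n → T = p + l.length →
    aLoop l (p : Int) none acc = emitLoop (bRuns l) (p : Int) T acc := by
  induction n with
  | zero =>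
    intro l p T acc hn hT
    have : l = [] := by cases l <;> simp_all
    subst this; simp [aLoop, bRuns, emitLoop]
  | succ n ih =>
    intro l p T acc hn hT
    cases l with
    | nil => simp [aLoop, bRuns, emitLoop]
    | cons s t =>
      cases s with
      | false =>
        rw [show aLoop (false :: t) (p : Int) none acc
            = aLoop t ((p : Int) + 1) none acc from by simp [aLoop]]
        have hp : ((p : Int) + 1) = ((p + 1 : Nat) : Int) := by push_cast; ring
        rw [hp, ih t (p + 1) T acc (by simp at hn; omega) (by simp at hT ⊢; omega)]
        rw [emit_false_cons, hp]
      | true =>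
        rw [show aLoop (true :: t) (p : Int) none acc
            = aLoop t ((p : Int) + 1) (some ((p : Int) - 1)) acc from by simp [aLoop]]
        rw [aLoop_mid]
        rw [show bRuns (true :: t)
            = (true, countRun true (true :: t)) :: bRuns ((true :: t).drop (countRun true (true :: t))) from by
          rw [bRuns]]
        have hc : countRun true (true :: t) = 1 + countRun true t := by simp [countRun]
        have hkle : countRun true t ≤ t.length := countRun_le_length true t
        by_cases h : countRun true t = t.length
        · rw [if_pos h]
          simp only [emitLoop, hc]
          rw [if_neg (by
            simp only [Bool.true_and, decide_eq_true_eq]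
            simp at hT
            push_cast
            omega)]
          rw [show (true :: t).drop (1 + countRun true t) = ([] : List Bool) from by
            rw [show 1 + countRun true t = (true :: t).length from by simp [h]; omega,
              List.drop_length]]
          simp [bRuns, emitLoop]
        · rw [if_neg h]
          have hklt : countRun true t < t.length := by omega
          simp only [emitLoop, hc]
          rw [if_pos (by
            simp only [Bool.true_and, decide_eq_true_eq]
            simp at hT
            push_cast
            omega)]
          rw [show (true :: t).drop (1 + countRun true t) = t.drop (countRun true t) from by
            rw [Nat.add_comm]; rfl]
          rw [drop_countRun true t hklt, Bool.not_true, emit_false_cons]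
          have hlen : (t.drop (countRun true t + 1)).length ≤ n := by
            simp; simp at hn; omega
          have hp2 : ((p : Int) + 1) + (countRun true t : Int) + 1
              = ((p + countRun true t + 2 : Nat) : Int) := by push_cast; ring
          rw [hp2, ih (t.drop (countRun true t + 1)) (p + countRun true t + 2) T _ hlen
            (by simp at hT ⊢; omega)]
          have ea : (p : Int) + ((1 + countRun true t : Nat) : Int) + 1
              = ((p + countRun true t + 2 : Nat) : Int) := by push_cast; ring
          have eb : (p : Int) + ((1 + countRun true t : Nat) : Int) - 1
              = (p : Int) + 1 + (countRun true t : Int) - 1 := by push_cast; ring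
          rw [ea, eb]

-- ===== VERDICT (by name: the statement is the Claim_ definition above) =====
theorem workout_spans_spec : Claim_equal_workout_spans := by
  intro spans _
  unfold Spec_workout_spans workout_spans workout_spans_alt
  have := main_none spans.length spans 0 spans.length [] (le_refl _) (by simp)
  simpa using this
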